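-- pv_equiv track=rewrite | github.com/jano31415/codejam | codeforces/153_edu_div2/probc.py | solve
-- ===== SOURCE A (Python) =====
-- def solve(n, perm):
--     dyn_perm = [0]*n
--     # first element always losing
--     # 1 alice winning, bob losing
--     # 0 bob winning, alice losing
--     dyn_perm[0]=0
--     smallest_perm = perm[0]
--     smallest_losing_perm = None
--     for j in range(1,n):
--         if smallest_perm > perm[j]:
--             dyn_perm[j]=0
--         elif smallest_losing_perm is None or smallest_losing_perm > perm[j]:
--             dyn_perm[j]=1
--         smallest_perm = min(smallest_perm, perm[j])
--         if dyn_perm[j]==1: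
--             if smallest_losing_perm is None:
--                 smallest_losing_perm = perm[j]
--             else:
--                 smallest_losing_perm = min(smallest_losing_perm, perm[j])
--
--     return sum(dyn_perm)
-- ===== SOURCE B (Python) =====
-- def solve(n, perm):
--     # Materialize the first n elements of the permutation.
--     first = [perm[j] for j in range(n)]
--     # Pass 1: drop the strict left-to-right minima of `first` (its head is always
--     # one), keeping the rest in order.
--     m = first[0]
--     rest = []
--     for x in first[1:]:
--         if x < m:
--             m = x
--         else:
--             rest.append(x)
--     # Pass 2: count the strict left-to-right minima of `rest`.
--     count = 0
--     best = None
--     for x in rest: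
--         if best is None or x < best:
--             count += 1
--             best = x
--     return count
-- ===== Notes on version B (the rewrite author's own statement) =====
-- stated objective: simpler
-- what changed: A's fused single scan maintaining a dyn 0/1 array plus two tracked minima is replaced by two plain passes: drop the running strict minima of perm[:n], then count the running strict minima of the remaining elements.
import Mathlib
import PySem

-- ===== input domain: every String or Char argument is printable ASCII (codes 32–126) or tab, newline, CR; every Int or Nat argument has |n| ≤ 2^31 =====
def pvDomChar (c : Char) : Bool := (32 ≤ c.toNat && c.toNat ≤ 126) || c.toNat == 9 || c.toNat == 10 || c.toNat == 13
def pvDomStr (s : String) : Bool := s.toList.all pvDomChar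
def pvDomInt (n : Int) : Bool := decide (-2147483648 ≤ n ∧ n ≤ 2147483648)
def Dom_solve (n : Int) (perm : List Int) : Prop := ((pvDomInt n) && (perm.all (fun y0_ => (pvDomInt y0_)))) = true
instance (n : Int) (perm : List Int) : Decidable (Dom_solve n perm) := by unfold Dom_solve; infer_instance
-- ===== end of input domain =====

-- B replaces A's fused scan (dyn array + two tracked minima) by two plain passes:
-- drop perm's running strict minima, then count the running strict minima of what remains
-- (objective: simpler; same O(n) cost).

-- ===== PORT A =====
-- one iteration of A's `for j in range(1, n)` loop; state = (dyn_perm, smallest_perm, smallest_losing_perm)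
def solveStepA (perm : List Int) (st : List Int × Int × Option Int) (j : Int) : List Int × Int × Option Int :=
  let dyn := st.1
  let sp := st.2.1
  let slp := st.2.2
  let pj := PySem.List.pyGetD perm j 0
  let dj : Int :=
    if sp > pj then 0
    else match slp with
      | none => 1
      | some s => if s > pj then 1 else 0
  let dyn' := PySem.List.pySetD dyn j dj
  let sp' := min sp pj
  let slp' := if dj = 1 then (match slp with | none => some pj | some s => some (min s pj)) else slp
  (dyn', sp', slp')

def solve (n : Int) (perm : List Int) : Int :=
  let dyn0 : List Int := List.replicate n.toNat 0        -- [0]*n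
  let dyn1 := PySem.List.pySetD dyn0 0 0                 -- dyn_perm[0] = 0 (IndexError when n ≤ 0: outside Pre_)
  let sp0 := PySem.List.pyGetD perm 0 0                  -- perm[0] (IndexError on []: outside Pre_)
  let res := (PySem.List.pyRange 1 n 1).foldl (solveStepA perm) (dyn1, sp0, none)
  res.1.sum

-- ===== PORT B =====
def solve_alt (n : Int) (perm : List Int) : Int :=
  let first := (PySem.List.pyRange 0 n 1).map
      (fun j => PySem.List.pyGetD perm j 0)              -- [perm[j] for j in range(n)] (IndexError when n > len: outside Pre_)
  let m0 := PySem.List.pyGetD first 0 0                  -- m = first[0] (IndexError when n ≤ 0: outside Pre_)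
  let mr := (PySem.List.slice first (some 1) none).foldl
      (fun (acc : Int × List Int) x => if x < acc.1 then (x, acc.2) else (acc.1, acc.2 ++ [x]))
      (m0, [])                                           -- pass 1 over first[1:]: (m, rest)
  let cb := mr.2.foldl
      (fun (acc : Int × Option Int) x =>
        match acc.2 with
        | none => (acc.1 + 1, some x)
        | some b => if x < b then (acc.1 + 1, some x) else acc)
      (0, (none : Option Int))                           -- pass 2: (count, best)
  cb.1

-- ===== PRECONDITION & SPEC =====
-- A raises IndexError when n < 1 (dyn_perm[0]=0 on an empty list, or perm[0] on []) or when
-- n > len(perm) (perm[j] out of range); Pre_ admits exactly the inputs where A returns.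
def Pre_solve (n : Int) (perm : List Int) : Prop := 1 ≤ n ∧ n ≤ perm.length
instance (n : Int) (perm : List Int) : Decidable (Pre_solve n perm) := by unfold Pre_solve; infer_instance
def pvWitness_solve : Int × List Int := (4, [3, 1, 4, 2])
def Spec_solve (n : Int) (perm : List Int) (out : Int) : Prop := out = solve_alt n perm
instance (n : Int) (perm : List Int) (out : Int) : Decidable (Spec_solve n perm out) := by unfold Spec_solve; infer_instance

-- ===== CLAIM (what is proved, stated in full; the proofs are below) =====
def Claim_equal_solve : Prop := ∀ (n : Int) (perm : List Int), Dom_solve n perm → Pre_solve n perm → Spec_solve n perm (solve n perm)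

-- ===== LEMMAS AND PROOFS =====

-- mathematical recursion mirroring A's per-element update (sum contributed from this point on)
def countA (sp : Int) (slp : Option Int) : List Int → Int
  | [] => 0
  | x :: xs =>
    if sp > x then countA (min sp x) slp xs
    else match slp with
      | none => 1 + countA (min sp x) (some x) xs
      | some s => if s > x then 1 + countA (min sp x) (some (min s x)) xs
                  else countA (min sp x) slp xs

-- the non-running-minima of a list, given current minimum m (B's pass 1)
def restOf (m : Int) : List Int → List Int
  | [] => []
  | x :: xs => if x < m then restOf x xs else x :: restOf m xs

-- count of running strict minima given current best (B's pass 2)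
def countRun (r : Option Int) : List Int → Int
  | [] => 0
  | x :: xs =>
    match r with
    | none => 1 + countRun (some x) xs
    | some b => if x < b then 1 + countRun (some x) xs else countRun (some b) xs

lemma sum_set_of_zero (l : List Int) (i : Nat) (v : Int) (h : l[i]? = some 0) :
    (l.set i v).sum = l.sum + v := by
  induction l generalizing i with
  | nil => simp at h
  | cons a t ih =>
    cases i with
    | zero => simp at h; simp [h]; ring
    | succ k =>
      simp only [List.getElem?_cons_succ] at h
      simp [List.set, ih k h]; ring

lemma fold1_snd (L : List Int) : ∀ (m : Int) (acc : List Int),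
    (L.foldl (fun (acc : Int × List Int) x => if x < acc.1 then (x, acc.2) else (acc.1, acc.2 ++ [x]))
      (m, acc)).2 = acc ++ restOf m L := by
  induction L with
  | nil => intro m acc; simp [restOf]
  | cons x xs ih =>
    intro m acc
    by_cases h : x < m
    · simp [List.foldl_cons, h, restOf, ih]
    · simp [List.foldl_cons, h, restOf, ih]

lemma fold2_fst (L : List Int) : ∀ (c : Int) (r : Option Int),
    (L.foldl (fun (acc : Int × Option Int) x =>
        match acc.2 with
        | none => (acc.1 + 1, some x)
        | some b => if x < b then (acc.1 + 1, some x) else acc) (c, r)).1 = c + countRun r L := by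
  induction L with
  | nil => intro c r; simp [countRun]
  | cons x xs ih =>
    intro c r
    match r with
    | none => simp [List.foldl_cons, countRun, ih]; ring
    | some b =>
      by_cases h : x < b
      · simp [List.foldl_cons, countRun, h, ih]; ring
      · simp [List.foldl_cons, countRun, h, ih]

lemma countA_eq_countRun (L : List Int) : ∀ (sp : Int) (slp : Option Int),
    countA sp slp L = countRun slp (restOf sp L) := by
  induction L with
  | nil => intro sp slp; simp [countA, restOf, countRun]
  | cons x xs ih =>
    intro sp slp
    by_cases h : sp > x
    · have hm : min sp x = x := by omega
      simp [countA, restOf, h, hm, ih]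
    · have hm : min sp x = sp := by omega
      have hr : restOf sp (x :: xs) = x :: restOf sp xs := by simp [restOf]; omega
      match slp with
      | none => simp [countA, h, hm, hr, countRun, ih]
      | some s =>
        by_cases hs : s > x
        · have hms : min s x = x := by omega
          simp [countA, h, hm, hs, hms, hr, countRun, ih]
        · have hx : ¬ x < s := by omega
          simp [countA, h, hm, hs, hr, countRun, ih]

lemma slice_cons (perm : List Int) (j n : Int) (h0 : 0 ≤ j) (hjn : j < n) (hn : n ≤ perm.length) :
    PySem.List.slice perm (some j) (some n)
      = perm[j.toNat]'(by omega) :: PySem.List.slice perm (some (j+1)) (some n) := by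
  have hj : j.toNat < perm.length := by omega
  rw [PySem.List.slice_toNat _ h0 (by omega), PySem.List.slice_toNat _ (by omega) (by omega)]
  rw [List.drop_eq_getElem_cons hj]
  have h1 : (j+1).toNat = j.toNat + 1 := by omega
  have h2 : n.toNat - j.toNat = (n.toNat - (j.toNat + 1)) + 1 := by omega
  rw [h1, h2, List.take_succ_cons]

lemma slice_nil (perm : List Int) (j n : Int) (h : n ≤ j) (h0 : 0 ≤ j) (hn : 0 ≤ n) :
    PySem.List.slice perm (some j) (some n) = [] := by
  rw [PySem.List.slice_toNat _ h0 hn]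
  have : n.toNat - j.toNat = 0 := by omega
  simp [this]

lemma map_pyRange_pyGetD_slice (perm : List Int) (nn : Int)
    (hn : nn ≤ perm.length) (hn0 : 0 ≤ nn) :
    ∀ (k : Nat) (j : Int), 0 ≤ j → k = (nn - j).toNat →
    (PySem.List.pyRange j nn 1).map (fun i => PySem.List.pyGetD perm i 0)
      = PySem.List.slice perm (some j) (some nn) := by
  intro k
  induction k with
  | zero =>
    intro j hj hk
    rw [PySem.List.pyRange_one_eq_nil (by omega), slice_nil perm j nn (by omega) hj hn0]
    rfl
  | succ m ih =>
    intro j hj hk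
    have hjn : j < nn := by omega
    rw [PySem.List.pyRange_one_cons hjn, slice_cons perm j nn hj hjn hn, List.map_cons,
        PySem.List.pyGetD_eq_getElem perm 0 hj (by omega)]
    rw [ih (j+1) (by omega) (by omega)]

lemma A_fold_sum (perm : List Int) (nn : Int) (hn : nn ≤ perm.length) (hn0 : 0 ≤ nn) :
    ∀ (k : Nat) (j : Int) (dyn : List Int) (sp : Int) (slp : Option Int),
    1 ≤ j → k = (nn - j).toNat →
    (∀ i : Nat, j ≤ (i : Int) → (i : Int) < nn → dyn[i]? = some 0) →
    ((PySem.List.pyRange j nn 1).foldl (solveStepA perm) (dyn, sp, slp)).1.sum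
      = dyn.sum + countA sp slp (PySem.List.slice perm (some j) (some nn)) := by
  intro k
  induction k with
  | zero =>
    intro j dyn sp slp hj hk hz
    have hnj : nn ≤ j := by omega
    rw [PySem.List.pyRange_one_eq_nil hnj, slice_nil perm j nn hnj (by omega) hn0]
    simp [countA]
  | succ m ih =>
    intro j dyn sp slp hj hk hz
    have hjn : j < nn := by omega
    have hjl : j.toNat < perm.length := by omega
    rw [PySem.List.pyRange_one_cons hjn, List.foldl_cons,
        slice_cons perm j nn (by omega) hjn hn]
    have hpj : PySem.List.pyGetD perm j 0 = perm[j.toNat]'hjl :=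
      PySem.List.pyGetD_eq_getElem perm 0 (by omega) (by omega)
    set pj := perm[j.toNat]'hjl with hpjdef
    have hdz : dyn[j.toNat]? = some 0 := hz j.toNat (by omega) (by omega)
    have hset : ∀ (v : Int), (PySem.List.pySetD dyn j v).sum = dyn.sum + v := by
      intro v
      rw [PySem.List.pySetD_of_nonneg dyn v (by omega)]
      exact sum_set_of_zero dyn j.toNat v hdz
    have hz' : ∀ (v : Int) (i : Nat), j + 1 ≤ (i : Int) → (i : Int) < nn →
        (PySem.List.pySetD dyn j v)[i]? = some 0 := by
      intro v i h1 h2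
      rw [PySem.List.pySetD_of_nonneg dyn v (by omega)]
      rw [List.getElem?_set_ne (by omega)]
      exact hz i (by omega) h2
    by_cases h1 : sp > pj
    · have hstep : solveStepA perm (dyn, sp, slp) j
          = (PySem.List.pySetD dyn j 0, min sp pj, slp) := by
        simp [solveStepA, hpj, h1]
      have hcA : countA sp slp (pj :: PySem.List.slice perm (some (j+1)) (some nn))
          = countA (min sp pj) slp (PySem.List.slice perm (some (j+1)) (some nn)) := by
        simp [countA, h1]
      rw [hstep, hcA, ih (j+1) _ (min sp pj) slp (by omega) (by omega) (hz' 0), hset]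
      simp
    · match slp with
      | none =>
        have hstep : solveStepA perm (dyn, sp, none) j
            = (PySem.List.pySetD dyn j 1, min sp pj, some pj) := by
          simp [solveStepA, hpj, h1]
        have hcA : countA sp none (pj :: PySem.List.slice perm (some (j+1)) (some nn))
            = 1 + countA (min sp pj) (some pj) (PySem.List.slice perm (some (j+1)) (some nn)) := by
          simp [countA, h1]
        rw [hstep, hcA, ih (j+1) _ (min sp pj) (some pj) (by omega) (by omega) (hz' 1), hset]
        ring
      | some s =>
        by_cases h2 : s > pj
        · have hstep : solveStepA perm (dyn, sp, some s) j
              = (PySem.List.pySetD dyn j 1, min sp pj, some (min s pj)) := by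
            simp [solveStepA, hpj, h1, h2]
          have hcA : countA sp (some s) (pj :: PySem.List.slice perm (some (j+1)) (some nn))
              = 1 + countA (min sp pj) (some (min s pj)) (PySem.List.slice perm (some (j+1)) (some nn)) := by
            simp [countA, h1, h2]
          rw [hstep, hcA, ih (j+1) _ (min sp pj) (some (min s pj)) (by omega) (by omega) (hz' 1), hset]
          ring
        · have hstep : solveStepA perm (dyn, sp, some s) j
              = (PySem.List.pySetD dyn j 0, min sp pj, some s) := by
            simp [solveStepA, hpj, h1, h2]
          have hcA : countA sp (some s) (pj :: PySem.List.slice perm (some (j+1)) (some nn))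
              = countA (min sp pj) (some s) (PySem.List.slice perm (some (j+1)) (some nn)) := by
            simp [countA, h1, h2]
          rw [hstep, hcA, ih (j+1) _ (min sp pj) (some s) (by omega) (by omega) (hz' 0), hset]
          simp

-- ===== VERDICT (by name: the statement is the Claim_ definition above) =====
theorem solve_spec : Claim_equal_solve := by
  intro n perm _ hpre
  obtain ⟨hn1, hnl⟩ := hpre
  unfold Spec_solve
  show solve n perm = solve_alt n perm
  have hd0 : PySem.List.pySetD (List.replicate n.toNat 0) 0 (0 : Int)
      = List.replicate n.toNat (0 : Int) := by
    rw [PySem.List.pySetD_of_nonneg _ _ (by omega)]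
    apply List.ext_getElem <;> simp
  simp only [solve, solve_alt]
  rw [hd0]
  have hz : ∀ i : Nat, (1 : Int) ≤ (i : Int) → (i : Int) < n →
      (List.replicate n.toNat (0 : Int))[i]? = some 0 := by
    intro i h1 h2
    rw [List.getElem?_replicate]
    simp only [if_pos (show i < n.toNat by omega)]
  rw [A_fold_sum perm n hnl (by omega) (n - 1).toNat 1 _ _ none (by omega) (by omega) hz]
  simp only [List.sum_replicate, smul_zero, zero_add]
  rw [countA_eq_countRun]
  rw [map_pyRange_pyGetD_slice perm n hnl (by omega) n.toNat 0 (by omega) (by omega)]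
  have hfirst : PySem.List.slice perm (some 0) (some n) = perm.take n.toNat := by
    rw [PySem.List.slice_toNat _ (by omega) (by omega)]
    simp
  have htail : PySem.List.slice (perm.take n.toNat) (some 1) none
      = PySem.List.slice perm (some 1) (some n) := by
    rw [PySem.List.slice_from_one, PySem.List.slice_toNat _ (by omega) (by omega),
        ← List.drop_one, List.drop_take]
    norm_num
  have hm0 : PySem.List.pyGetD (perm.take n.toNat) 0 0 = PySem.List.pyGetD perm 0 0 := by
    rw [PySem.List.pyGetD_zero, PySem.List.pyGetD_zero]
    rcases perm with _ | ⟨a, t⟩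
    · simp at hnl; omega
    · have : n.toNat = (n.toNat - 1) + 1 := by omega
      rw [this, List.take_succ_cons]
      simp
  rw [hfirst, htail, hm0, fold1_snd, fold2_fst]
  simp
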